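-- pv_equiv track=rewrite | github.com/ecolban/Codewars | python_code/src/become_immortal.py | elder_age
-- ===== SOURCE A (Python) =====
-- def pow2(n):
--     p = 1
--     while p <= n: p <<= 1
--     return p >> 1
--
-- def mult(a, b, m):
--     return (a % m) * (b % m) % m
--
-- def arithmetic_sum(end, modulus, start=0, adj=0):
--     """Return sum(max(i + adj, 0) for i in range(start, end)) % modulus"""
--     start, end = max(0, start + adj), end + adj
--     if end <= start: return 0
--     # 0 <= start < end. Return (start + end - 1) * (end - start) // 2 % modulus
--     k, n = start + end - 1, end - start
--     return mult(k, n >> 1, modulus) if k & 1 else mult(k >> 1, n, modulus)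
--
-- def elder_age(rows, cols, loss, m):
--     if rows > cols: rows, cols = cols, rows
--     if rows == 0: return 0
--     pr, pc = pow2(rows), pow2(cols)
--     row_sum = arithmetic_sum(end=pc, adj=-loss, modulus=m)
--     return (mult(row_sum, rows, m)
--             + elder_age(cols - pc, rows, loss - pc, m)
--             if rows < pc else
--             mult(row_sum, pr, m)
--             + elder_age(rows - pr, pc, loss - pr, m)
--             + elder_age(cols - pc, pr, loss - pc, m)
--             + elder_age(rows - pr, cols - pc, loss, m)) % m
-- ===== SOURCE B (Python) =====
-- def pow2(n):
--     p = 1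
--     while p <= n: p <<= 1
--     return p >> 1
--
-- def mult(a, b, m):
--     return (a % m) * (b % m) % m
--
-- def arithmetic_sum(end, modulus, start=0, adj=0):
--     """Return sum(max(i + adj, 0) for i in range(start, end)) % modulus"""
--     start, end = max(0, start + adj), end + adj
--     if end <= start: return 0
--     k, n = start + end - 1, end - start
--     return mult(k, n >> 1, modulus) if k & 1 else mult(k >> 1, n, modulus)
--
-- def elder_age(rows, cols, loss, m):
--     s = 0
--     stack = [(rows, cols, loss)]
--     while stack:
--         r, c, l = stack.pop()
--         if r > c: r, c = c, r
--         if r == 0: continue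
--         pc = pow2(c)
--         row_sum = arithmetic_sum(end=pc, adj=-l, modulus=m)
--         if r < pc:
--             s += mult(row_sum, r, m)
--             stack.append((c - pc, r, l - pc))
--         else:
--             pr = pow2(r)
--             s += mult(row_sum, pr, m)
--             stack.append((r - pr, pc, l - pr))
--             stack.append((c - pc, pr, l - pc))
--             stack.append((r - pr, c - pc, l))
--     return s % m
-- ===== Notes on version B (the rewrite author's own statement) =====
-- stated objective: alternative
-- what changed: Replaced A's recursion (which reduces mod m at every level and sums recursive results) by an explicit worklist stack with a single running accumulator and one final reduction mod m.
-- outside the precondition, e.g. on elder_age(0, 0, 0, 0): A returns 0, B raises ZeroDivisionError; on elder_age(0, 5, 1, 0): A returns 0, B raises ZeroDivisionError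
import Mathlib
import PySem

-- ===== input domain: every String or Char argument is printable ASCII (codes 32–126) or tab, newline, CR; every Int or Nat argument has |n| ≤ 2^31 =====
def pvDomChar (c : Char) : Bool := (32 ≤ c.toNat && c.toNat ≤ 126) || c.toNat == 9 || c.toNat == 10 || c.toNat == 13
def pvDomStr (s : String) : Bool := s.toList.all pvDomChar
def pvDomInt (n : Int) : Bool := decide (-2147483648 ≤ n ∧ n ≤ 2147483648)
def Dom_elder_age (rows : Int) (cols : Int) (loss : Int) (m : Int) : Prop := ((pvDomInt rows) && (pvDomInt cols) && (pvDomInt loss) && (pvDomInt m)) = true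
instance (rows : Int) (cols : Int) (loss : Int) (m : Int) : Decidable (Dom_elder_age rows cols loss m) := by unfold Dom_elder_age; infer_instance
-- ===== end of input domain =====

-- B replaces A's recursion (re-modding at every level) by an explicit worklist stack with one
-- accumulator and a single final reduction mod m; same helpers, different control structure.
-- Objective: alternative (no measured speed claim).

-- ===== PORT A =====
-- shared helpers (identical in Source A and Source B): pow2, mult, arithmetic_sum
-- pow2's while loop is ported with a fuel counter; fuel n.toNat+2 never runs out (p doubles from 1),
-- so the fuel-0 branch is dead code returning the same `p >> 1`.
def pvPow2Go : Nat → Int → Int → Int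
  | 0, p, _ => p >>> (1 : Nat)
  | f + 1, p, n => if p ≤ n then pvPow2Go f (p <<< (1 : Nat)) n else p >>> (1 : Nat)

def pvPow2 (n : Int) : Int := pvPow2Go (n.toNat + 2) 1 n

def pvMult (a b m : Int) : Int := PySem.Int.mod (PySem.Int.mod a m * PySem.Int.mod b m) m

def pvArithmeticSum (end_ modulus start adj : Int) : Int :=
  let start' := max 0 (start + adj)
  let end' := end_ + adj
  if end' ≤ start' then 0
  else
    let k := start' + end' - 1
    let n := end' - start'
    if PySem.Int.band k 1 ≠ 0 then pvMult k (n >>> (1 : Nat)) modulus else pvMult (k >>> (1 : Nat)) n modulus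

-- body of A's function after the swap (rows ≤ cols established by the caller); `rec` is the recursive call
def pvAgoBody (rec : Int → Int → Int → Int → Int) (rows cols loss m : Int) : Int :=
  if rows = 0 then 0
  else
    let pr := pvPow2 rows
    let pc := pvPow2 cols
    let row_sum := pvArithmeticSum pc m 0 (-loss)
    PySem.Int.mod
      (if rows < pc then
        pvMult row_sum rows m + rec (cols - pc) rows (loss - pc) m
      else
        pvMult row_sum pr m + rec (rows - pr) pc (loss - pr) m
          + rec (cols - pc) pr (loss - pc) m + rec (rows - pr) (cols - pc) loss m) m

-- A's recursion, fuel-counted: each recursive call strictly decreases rows+cols, so fuel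
-- (rows+cols).toNat+1 suffices on the admitted inputs; the fuel-0 branch is dead code.
def pvAgo : Nat → Int → Int → Int → Int → Int
  | 0, _, _, _, _ => 0
  | f + 1, rows, cols, loss, m =>
    if cols < rows then pvAgoBody (pvAgo f) cols rows loss m
    else pvAgoBody (pvAgo f) rows cols loss m

def elder_age (rows : Int) (cols : Int) (loss : Int) (m : Int) : Int :=
  pvAgo ((rows + cols).toNat + 1) rows cols loss m

-- ===== PORT B =====
-- one pop of B's worklist loop, r ≤ c already established; `rec` continues the loop
def pvBStep (rec : List (Int × Int × Int) → Int → Int → Int)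
    (r c l : Int) (rest : List (Int × Int × Int)) (s m : Int) : Int :=
  if r = 0 then rec rest s m
  else
    let pc := pvPow2 c
    let row_sum := pvArithmeticSum pc m 0 (-l)
    if r < pc then rec ((c - pc, r, l - pc) :: rest) (s + pvMult row_sum r m) m
    else
      let pr := pvPow2 r
      -- list head = next pop, so the three pushes appear in reverse push order
      rec ((r - pr, c - pc, l) :: (c - pc, pr, l - pc) :: (r - pr, pc, l - pr) :: rest)
        (s + pvMult row_sum pr m) m

-- B's while loop, fuel-counted: Σ 4^(r+c) over the stack strictly decreases each pop, so fuel
-- 4^((rows+cols).toNat)+1 suffices on the admitted inputs; the fuel-0 branch is dead code.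
def pvBgo : Nat → List (Int × Int × Int) → Int → Int → Int
  | 0, _, s, m => PySem.Int.mod s m
  | _ + 1, [], s, m => PySem.Int.mod s m
  | f + 1, (r, c, l) :: rest, s, m =>
    if c < r then pvBStep (pvBgo f) c r l rest s m
    else pvBStep (pvBgo f) r c l rest s m

def elder_age_alt (rows : Int) (cols : Int) (loss : Int) (m : Int) : Int :=
  pvBgo (4 ^ (rows + cols).toNat + 1) [(rows, cols, loss)] 0 m

-- ===== PRECONDITION & SPEC =====
-- Pre_ excludes the inputs where the Python A raises — a negative dimension makes the recursion
-- diverge (RecursionError) and m = 0 raises ZeroDivisionError in mult — plus the degenerate corner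
-- m = 0 with an empty grid side, where A returns 0 before ever reducing mod m while B's final
-- `s % m` raises ZeroDivisionError.
def Pre_elder_age (rows : Int) (cols : Int) (loss : Int) (m : Int) : Prop :=
  0 ≤ rows ∧ 0 ≤ cols ∧ m ≠ 0
instance (rows : Int) (cols : Int) (loss : Int) (m : Int) : Decidable (Pre_elder_age rows cols loss m) := by unfold Pre_elder_age; infer_instance

def pvWitness_elder_age : Int × Int × Int × Int := (8, 5, 1, 100)

def Spec_elder_age (rows : Int) (cols : Int) (loss : Int) (m : Int) (out : Int) : Prop := out = elder_age_alt rows cols loss m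
instance (rows : Int) (cols : Int) (loss : Int) (m : Int) (out : Int) : Decidable (Spec_elder_age rows cols loss m out) := by unfold Spec_elder_age; infer_instance

-- ===== CLAIM (what is proved, stated in full; the proofs are below) =====
def Claim_equal_elder_age : Prop := ∀ (rows : Int) (cols : Int) (loss : Int) (m : Int), Dom_elder_age rows cols loss m → Pre_elder_age rows cols loss m → Spec_elder_age rows cols loss m (elder_age rows cols loss m)

-- ===== LEMMAS AND PROOFS =====

-- A's value with canonical fuel
def pvAgoF (r c l m : Int) : Int := pvAgo ((r + c).toNat + 1) r c l m

-- sum of A-values over a stack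
def pvSSum (m : Int) : List (Int × Int × Int) → Int
  | [] => 0
  | (r, c, l) :: rest => pvAgoF r c l m + pvSSum m rest

-- termination measure of B's stack
def pvMu : List (Int × Int × Int) → Nat
  | [] => 0
  | (r, c, _) :: rest => 4 ^ (r + c).toNat + pvMu rest

lemma pvPow2Go_gt (f : Nat) (p n : Int) (h : n < p) : pvPow2Go f p n = p >>> (1 : Nat) := by
  cases f with
  | zero => rfl
  | succ g => simp [pvPow2Go, not_le.2 h]

lemma pvPow2Go_bounds (f : Nat) (p n : Int) (hp : 1 ≤ p) (hpn : p ≤ n) (hf : n < p * 2 ^ f) :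
    p ≤ pvPow2Go f p n ∧ pvPow2Go f p n ≤ n := by
  induction f generalizing p with
  | zero => simp at hf; omega
  | succ g IH =>
    have hsl : p <<< (1 : Nat) = 2 * p := by simp [Int.shiftLeft_eq]; ring
    simp only [pvPow2Go, if_pos hpn]
    rw [hsl]
    by_cases h2 : 2 * p ≤ n
    · have hb : n < 2 * p * 2 ^ g := by
        have : (p : Int) * 2 ^ (g + 1) = 2 * p * 2 ^ g := by ring
        omega
      have := IH (2 * p) (by omega) h2 hb
      omega
    · rw [pvPow2Go_gt g (2 * p) n (by omega)]
      have : (2 * p) >>> (1 : Nat) = p := by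
        have := @Int.shiftRight_eq_div_pow (2 * p) 1
        omega
      omega

lemma pvPow2_bounds (n : Int) (h : 1 ≤ n) : 1 ≤ pvPow2 n ∧ pvPow2 n ≤ n := by
  have h2 : (n.toNat : Int) = n := by omega
  have hlt : n.toNat < 2 ^ (n.toNat + 2) := by
    have := Nat.lt_two_pow_self (n := n.toNat)
    have : 2 ^ n.toNat ≤ 2 ^ (n.toNat + 2) := Nat.pow_le_pow_right (by omega) (by omega)
    omega
  have hf : n < 1 * 2 ^ (n.toNat + 2) := by
    have : (n.toNat : Int) < ((2 ^ (n.toNat + 2) : Nat) : Int) := by exact_mod_cast hlt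
    push_cast at this
    omega
  exact pvPow2Go_bounds (n.toNat + 2) 1 n le_rfl h hf

lemma pvMod_absorb (a x b m : Int) :
    PySem.Int.mod (a + PySem.Int.mod x m + b) m = PySem.Int.mod (a + x + b) m := by
  simp only [PySem.Int.mod]
  have hx : x.fmod m = x - m * (x.fdiv m) := Int.fmod_def x m
  have : a + x.fmod m + b = (a + x + b) + m * (-(x.fdiv m)) := by rw [hx]; ring
  rw [this, Int.add_mul_fmod_self_left]

lemma pvMod_absorb' (s x b m : Int) :
    PySem.Int.mod (s + (PySem.Int.mod x m + b)) m = PySem.Int.mod (s + (x + b)) m := by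
  have h := pvMod_absorb s x b m
  rw [show s + (PySem.Int.mod x m + b) = s + PySem.Int.mod x m + b by ring,
      show s + (x + b) = s + x + b by ring] at *
  exact h

lemma pvAgoBody_mod (rec : Int → Int → Int → Int → Int) (r c l m : Int) :
    PySem.Int.mod (pvAgoBody rec r c l m) m = pvAgoBody rec r c l m := by
  simp only [pvAgoBody]
  split_ifs <;> simp [PySem.Int.mod, Int.zero_fmod, Int.fmod_fmod_of_dvd _ dvd_rfl]

lemma pvAgo_mod (f : Nat) (r c l m : Int) :
    PySem.Int.mod (pvAgo f r c l m) m = pvAgo f r c l m := by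
  cases f with
  | zero => simp [pvAgo, PySem.Int.mod, Int.zero_fmod]
  | succ g =>
    simp only [pvAgo]
    split_ifs <;> exact pvAgoBody_mod _ _ _ _ _

-- fuel stability of A's recursion: any sufficient fuel computes the canonical value
lemma pvAgo_stable (f : Nat) (r c l m : Int) (hr : 0 ≤ r) (hc : 0 ≤ c)
    (hf : (r + c).toNat < f) : pvAgo f r c l m = pvAgoF r c l m := by
  induction f using Nat.strong_induction_on generalizing r c l with
  | _ f IH =>
    obtain ⟨g, rfl⟩ : ∃ g, f = g + 1 := ⟨f - 1, by omega⟩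
    have key : ∀ r c l : Int, 0 ≤ r → r ≤ c → (r + c).toNat ≤ g →
        pvAgoBody (pvAgo g) r c l m = pvAgoBody (pvAgo ((r + c).toNat)) r c l m := by
      intro r c l hr hrc hg
      by_cases hr0 : r = 0
      · simp [pvAgoBody, hr0]
      · have hr1 : 1 ≤ r := by omega
        have hc1 : 1 ≤ c := by omega
        obtain ⟨hpr1, hpr2⟩ := pvPow2_bounds r hr1
        obtain ⟨hpc1, hpc2⟩ := pvPow2_bounds c hc1
        simp only [pvAgoBody, if_neg hr0]
        by_cases hlt : r < pvPow2 c
        · simp only [if_pos hlt]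
          rw [IH g (by omega) (c - pvPow2 c) r _ (by omega) hr (by omega),
              IH (r + c).toNat (by omega) (c - pvPow2 c) r _ (by omega) hr (by omega)]
        · simp only [if_neg hlt]
          rw [IH g (by omega) (r - pvPow2 r) (pvPow2 c) _ (by omega) (by omega) (by omega),
              IH (r + c).toNat (by omega) (r - pvPow2 r) (pvPow2 c) _ (by omega) (by omega) (by omega),
              IH g (by omega) (c - pvPow2 c) (pvPow2 r) _ (by omega) (by omega) (by omega),
              IH (r + c).toNat (by omega) (c - pvPow2 c) (pvPow2 r) _ (by omega) (by omega) (by omega),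
              IH g (by omega) (r - pvPow2 r) (c - pvPow2 c) _ (by omega) (by omega) (by omega),
              IH (r + c).toNat (by omega) (r - pvPow2 r) (c - pvPow2 c) _ (by omega) (by omega) (by omega)]
    simp only [pvAgoF, pvAgo]
    by_cases hcr : c < r
    · rw [if_pos hcr, if_pos hcr, key c r l hc (by omega) (by omega)]
      have : (c + r).toNat = (r + c).toNat := by omega
      rw [this]
    · rw [if_neg hcr, if_neg hcr, key r c l hr (by omega) (by omega)]

lemma pvAgoF_swap (r c l m : Int) : pvAgoF r c l m = pvAgoF c r l m := by
  have ht : (c + r).toNat = (r + c).toNat := by omega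
  rcases lt_trichotomy r c with h | h | h
  · simp only [pvAgoF, pvAgo, ht, if_neg (show ¬ c < r by omega), if_pos h]
  · subst h
    simp only [pvAgoF, pvAgo]
  · simp only [pvAgoF, pvAgo, ht, if_pos h, if_neg (show ¬ r < c by omega)]

-- the loop invariant of B: the loop's result is (s + Σ A-values over the stack) % m
lemma pvBgo_inv (f : Nat) (stack : List (Int × Int × Int)) (s m : Int)
    (hst : ∀ e ∈ stack, 0 ≤ e.1 ∧ 0 ≤ e.2.1) (hf : pvMu stack < f) :
    pvBgo f stack s m = PySem.Int.mod (s + pvSSum m stack) m := by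
  induction f generalizing stack s with
  | zero => omega
  | succ g IH =>
    match stack, hst, hf with
    | [], _, _ => simp [pvBgo, pvSSum]
    | (r₀, c₀, l) :: rest, hst, hf =>
      have hr₀ : 0 ≤ r₀ := (hst (r₀, c₀, l) (List.mem_cons_self ..)).1
      have hc₀ : 0 ≤ c₀ := (hst (r₀, c₀, l) (List.mem_cons_self ..)).2
      have hrest : ∀ e ∈ rest, 0 ≤ e.1 ∧ 0 ≤ e.2.1 := fun e he => hst e (List.mem_cons_of_mem _ he)
      have hmu : 4 ^ (r₀ + c₀).toNat + pvMu rest < g + 1 := hf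
      have hmain : ∀ r c : Int, 0 ≤ r → r ≤ c → (r + c).toNat = (r₀ + c₀).toNat →
          pvBStep (pvBgo g) r c l rest s m =
            PySem.Int.mod (s + (pvAgoF r c l m + pvSSum m rest)) m := by
        intro r c hr hrc hsum
        have hone : 1 ≤ 4 ^ (r₀ + c₀).toNat := Nat.one_le_pow _ _ (by omega)
        by_cases hr0 : r = 0
        · have hAz : pvAgoF r c l m = 0 := by
            subst hr0
            simp [pvAgoF, pvAgo, pvAgoBody, not_lt.2 (le_trans hr hrc)]
          rw [pvBStep, if_pos hr0, IH rest s hrest (by omega), hAz, zero_add]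
        · have hr1 : 1 ≤ r := by omega
          have hc1 : 1 ≤ c := by omega
          obtain ⟨hpr1, hpr2⟩ := pvPow2_bounds r hr1
          obtain ⟨hpc1, hpc2⟩ := pvPow2_bounds c hc1
          have hAunf : pvAgoF r c l m =
              pvAgoBody (pvAgo ((r + c).toNat)) r c l m := by
            simp only [pvAgoF, pvAgo, if_neg (not_lt.2 hrc)]
          have hmono : ∀ a b : Nat, a < b → (4:Nat) ^ a ≤ 4 ^ b / 4 := by
            intro a b hab
            have : (4:Nat) ^ a * 4 ≤ 4 ^ b := by
              calc (4:Nat) ^ a * 4 = 4 ^ (a + 1) := by ring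
              _ ≤ 4 ^ b := Nat.pow_le_pow_right (by omega) (by omega)
            omega
          have h4 : 4 ^ (r₀ + c₀).toNat % 4 = 0 := by
            have : (r₀ + c₀).toNat = ((r + c).toNat - 1) + 1 := by omega
            rw [this, pow_succ]; omega
          simp only [pvBStep, if_neg hr0]
          by_cases hlt : r < pvPow2 c
          · have hchild : ((c - pvPow2 c) + r).toNat < (r + c).toNat := by omega
            have := hmono _ _ (by rw [hsum] at hchild; exact hchild)
            rw [if_pos hlt,
              IH _ _ (by
                  intro e he
                  simp only [List.mem_cons] at he
                  rcases he with rfl | he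
                  · exact ⟨by omega, hr⟩
                  · exact hrest e he)
                (by simp only [pvMu]; omega)]
            rw [hAunf]
            simp only [pvAgoBody, if_neg hr0, if_pos hlt]
            rw [pvAgo_stable _ _ _ _ _ (by omega) hr (by omega)]
            simp only [pvSSum]
            rw [pvMod_absorb']
            congr 1; ring
          · have hc1' : ((r - pvPow2 r) + (c - pvPow2 c)).toNat < (r + c).toNat := by omega
            have hc2' : ((c - pvPow2 c) + pvPow2 r).toNat < (r + c).toNat := by omega
            have hc3' : ((r - pvPow2 r) + pvPow2 c).toNat < (r + c).toNat := by omega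
            have m1 := hmono _ _ (by rw [hsum] at hc1'; exact hc1')
            have m2 := hmono _ _ (by rw [hsum] at hc2'; exact hc2')
            have m3 := hmono _ _ (by rw [hsum] at hc3'; exact hc3')
            rw [if_neg hlt,
              IH _ _ (by
                  intro e he
                  simp only [List.mem_cons] at he
                  rcases he with rfl | rfl | rfl | he
                  · exact ⟨show (0:Int) ≤ r - pvPow2 r by omega, show (0:Int) ≤ c - pvPow2 c by omega⟩
                  · exact ⟨show (0:Int) ≤ c - pvPow2 c by omega, show (0:Int) ≤ pvPow2 r by omega⟩
                  · exact ⟨show (0:Int) ≤ r - pvPow2 r by omega, show (0:Int) ≤ pvPow2 c by omega⟩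
                  · exact hrest e he)
                (by simp only [pvMu]; omega)]
            rw [hAunf]
            simp only [pvAgoBody, if_neg hr0, if_neg hlt]
            rw [pvAgo_stable _ _ _ _ _ (by omega) (by omega) (by omega),
              pvAgo_stable _ _ _ _ _ (by omega) (by omega) (by omega),
              pvAgo_stable _ _ _ _ _ (by omega) (by omega) (by omega)]
            simp only [pvSSum]
            rw [pvMod_absorb']
            congr 1; ring
      show pvBgo (g + 1) ((r₀, c₀, l) :: rest) s m = _
      simp only [pvBgo, pvSSum]
      by_cases hcr : c₀ < r₀
      · rw [if_pos hcr, hmain c₀ r₀ hc₀ (by omega) (by omega), pvAgoF_swap c₀ r₀]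
      · rw [if_neg hcr, hmain r₀ c₀ hr₀ (by omega) rfl]

-- ===== VERDICT (by name: the statement is the Claim_ definition above) =====
theorem elder_age_spec : Claim_equal_elder_age := by
  intro rows cols loss m _hdom hpre
  obtain ⟨hr, hc, _hm⟩ := hpre
  unfold Spec_elder_age elder_age_alt
  rw [pvBgo_inv _ _ _ _
      (by intro e he; rcases List.mem_singleton.1 he with rfl; exact ⟨hr, hc⟩)
      (by simp [pvMu])]
  simp only [pvSSum, add_zero, zero_add, pvAgoF]
  rw [pvAgo_mod]
  rfl
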